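-- pv_equiv track=rewrite | github.com/treuille/dauphin-notion-mcp | src/notion_mcp.py | _csv_escape
-- ===== SOURCE A (Python) =====
-- def _csv_escape(value: str) -> str:
--     """Escape a value for CSV output.
--
--     Rules:
--     - If value contains comma, quote, or newline → wrap in double quotes
--     - Double quotes inside are escaped by doubling: " → ""
--     """
--     if not value:
--         return ""
--
--     needs_quoting = any(c in value for c in ',"\n\r')
--
--     if needs_quoting:
--         # Escape quotes by doubling them
--         escaped = value.replace('"', '""')
--         return f'"{escaped}"'
--
--     return value
-- ===== SOURCE B (Python) =====
-- def _csv_escape(value: str) -> str: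
--     """Single pass: escape quotes and detect the need for quoting in one scan."""
--     if not value:
--         return ""
--     parts = []
--     needs_quoting = False
--     for c in value:
--         parts.append('""' if c == '"' else c)
--         if c in ',"\n\r':
--             needs_quoting = True
--     if needs_quoting:
--         return '"' + ''.join(parts) + '"'
--     return value
-- ===== Notes on version B (the rewrite author's own statement) =====
-- stated objective: alternative
-- what changed: Replaces A's two separate scans (any() membership test over four special characters, then str.replace for quote doubling) with one combined pass that simultaneously builds the escaped text and sets a needs_quoting flag.
import Mathlib
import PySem

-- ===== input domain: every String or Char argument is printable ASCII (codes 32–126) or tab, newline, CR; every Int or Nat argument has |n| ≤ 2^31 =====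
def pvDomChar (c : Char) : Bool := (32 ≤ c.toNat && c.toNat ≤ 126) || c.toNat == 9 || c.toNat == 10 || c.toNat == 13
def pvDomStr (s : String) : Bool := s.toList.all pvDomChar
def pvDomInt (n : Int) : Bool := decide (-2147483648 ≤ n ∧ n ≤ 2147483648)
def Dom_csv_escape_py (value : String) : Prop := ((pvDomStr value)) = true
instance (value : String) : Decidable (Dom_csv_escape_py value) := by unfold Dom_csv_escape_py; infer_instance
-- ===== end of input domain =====

-- B replaces A's two separate scans (any() detection, then str.replace) by one combined
-- detect-and-escape pass with an accumulator; same O(n) cost, different decomposition.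

-- ===== PORT A =====
def csv_escape_py (value : String) : String :=
  if value = "" then ""
  else
    let needs_quoting :=
      ([',', '"', '\n', '\r'] : List Char).any (fun c => PySem.Chars.isIn [c] value.toList)
    if needs_quoting then
      let escaped := PySem.Str.replace value "\"" "\"\""
      "\"" ++ escaped ++ "\""
    else value

-- ===== PORT B =====
def csv_escape_py_alt (value : String) : String :=
  if value = "" then ""
  else
    let st := value.toList.foldl
      (fun (st : List Char × Bool) c =>
        (st.1 ++ (if c = '"' then ['"', '"'] else [c]),
         st.2 || decide (c ∈ ([',', '"', '\n', '\r'] : List Char))))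
      ([], false)
    if st.2 then String.ofList ('"' :: st.1 ++ ['"']) else value

-- ===== PRECONDITION & SPEC =====
def Spec_csv_escape_py (value : String) (out : String) : Prop := out = csv_escape_py_alt value
instance (value : String) (out : String) : Decidable (Spec_csv_escape_py value out) := by unfold Spec_csv_escape_py; infer_instance

-- ===== CLAIM (what is proved, stated in full; the proofs are below) =====
def Claim_equal_csv_escape_py : Prop := ∀ (value : String), Dom_csv_escape_py value → Spec_csv_escape_py value (csv_escape_py value)

-- ===== LEMMAS AND PROOFS =====

-- character-wise escaping used to characterise both sides
def pvEsc (c : Char) : List Char := if c = '"' then ['"', '"'] else [c]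

theorem pvGo_eq (new : List Char) :
    ∀ (fuel : Nat) (l acc : List Char), l.length ≤ fuel →
      PySem.Chars.replace.go ['"'] new fuel l acc =
        acc.reverse ++ l.flatMap (fun c => if c = '"' then new else [c]) := by
  intro fuel
  induction fuel with
  | zero =>
    intro l acc h
    have : l = [] := List.eq_nil_of_length_eq_zero (Nat.le_zero.mp h)
    subst this
    simp [PySem.Chars.replace.go]
  | succ n ih =>
    intro l acc h
    cases l with
    | nil => simp [PySem.Chars.replace.go]
    | cons c t =>
      by_cases hc : c = '"'
      · subst hc
        have hp : (['"'] : List Char).isPrefixOf ('"' :: t) = true := by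
          simp [List.isPrefixOf]
        simp only [PySem.Chars.replace.go, hp, if_pos]
        rw [show List.drop (['"'] : List Char).length ('"' :: t) = t from rfl]
        rw [ih t (new.reverse ++ acc) (by simpa using Nat.le_of_succ_le_succ h)]
        simp
      · have hp : (['"'] : List Char).isPrefixOf (c :: t) = false := by
          simp [List.isPrefixOf, Ne.symm hc]
        simp only [PySem.Chars.replace.go, hp]
        rw [ih t (c :: acc) (by simpa using Nat.le_of_succ_le_succ h)]
        simp [hc]

theorem pvReplace_eq (s : List Char) :
    PySem.Chars.replace s ['"'] ['"', '"'] = s.flatMap pvEsc := by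
  unfold PySem.Chars.replace
  simp only [List.isEmpty_iff, reduceCtorEq, if_false]
  rw [pvGo_eq ['"', '"'] s.length s [] (le_refl _)]
  rfl

theorem pvIsIn_single (c : Char) (s : List Char) :
    PySem.Chars.isIn [c] s = s.contains c := by
  by_cases h : c ∈ s
  · have hin : ([c] : List Char) <:+: s := by
      obtain ⟨l₁, l₂, hs⟩ := List.append_of_mem h
      exact ⟨l₁, l₂, by simp [hs]⟩
    rw [(PySem.Chars.isIn_iff_infix _ _).mpr hin, List.contains_iff_mem.mpr h]
  · have hni : ¬ ([c] : List Char) <:+: s := fun hin => h (hin.mem (List.mem_singleton_self c))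
    rw [(PySem.Chars.isIn_eq_false_iff _ _).mpr hni]
    simp [h]

theorem pvFoldl_eq (l : List Char) :
    ∀ (acc : List Char) (b : Bool),
      l.foldl
        (fun (st : List Char × Bool) c =>
          (st.1 ++ (if c = '"' then ['"', '"'] else [c]),
           st.2 || decide (c ∈ ([',', '"', '\n', '\r'] : List Char))))
        (acc, b) =
      (acc ++ l.flatMap pvEsc,
       b || l.any (fun c => decide (c ∈ ([',', '"', '\n', '\r'] : List Char)))) := by
  induction l with
  | nil => intro acc b; simp
  | cons c t ih =>
    intro acc b
    simp only [List.foldl_cons, ih, List.flatMap_cons, List.any_cons]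
    simp [pvEsc, Bool.or_assoc, List.append_assoc]

theorem pvNeeds_eq (s : List Char) :
    ([',', '"', '\n', '\r'] : List Char).any (fun c => PySem.Chars.isIn [c] s) =
      s.any (fun c => decide (c ∈ ([',', '"', '\n', '\r'] : List Char))) := by
  simp only [pvIsIn_single]
  rw [Bool.eq_iff_iff]
  simp only [List.any_eq_true, List.contains_iff_mem, decide_eq_true_eq]
  exact ⟨fun ⟨c, h1, h2⟩ => ⟨c, h2, h1⟩, fun ⟨c, h1, h2⟩ => ⟨c, h2, h1⟩⟩


-- ===== VERDICT (by name: the statement is the Claim_ definition above) =====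
theorem csv_escape_py_spec : Claim_equal_csv_escape_py := by
  intro value _
  unfold Spec_csv_escape_py csv_escape_py csv_escape_py_alt
  by_cases hv : value = ""
  · simp [hv]
  · simp only [hv, if_false]
    rw [pvFoldl_eq value.toList [] false]
    simp only [List.nil_append, Bool.false_or]
    rw [pvNeeds_eq]
    split_ifs with hneed
    · apply String.toList_inj.mp
      simp only [String.toList_append, PySem.Str.toList_replace, String.toList_ofList]
      rw [show ("\"" : String).toList = ['"'] from rfl,
          show ("\"\"" : String).toList = ['"', '"'] from rfl, pvReplace_eq]
      simp
    · rfl
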